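-- pv_equiv track=rewrite | github.com/kano-ai-org/kano-agent-backlog-skill | src/kano_backlog_ops/worklog.py | get_worklog_entries
-- ===== SOURCE A (Python) =====
-- from typing import List, Optional
--
-- def find_worklog_section(lines: List[str]) -> int:
--     """Find the index of the Worklog section header.
--
--     Args:
--         lines: List of content lines
--
--     Returns:
--         Index of "# Worklog" line, or -1 if not found
--     """
--     for idx, line in enumerate(lines):
--         if line.strip() == "# Worklog":
--             return idx
--     return -1
--
-- def get_worklog_entries(lines: List[str]) -> List[str]:
--     """Get all worklog entries from content.
--
--     Args:
--         lines: List of content lines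
--
--     Returns:
--         List of worklog entry lines (excluding header and empty lines)
--     """
--     worklog_idx = find_worklog_section(lines)
--     if worklog_idx == -1:
--         return []
--
--     entries = []
--     for line in lines[worklog_idx + 1 :]:
--         stripped = line.strip()
--         if not stripped:
--             continue
--         entries.append(line)
--
--     return entries
-- ===== SOURCE B (Python) =====
-- from typing import List
--
-- def get_worklog_entries(lines: List[str]) -> List[str]:
--     """Single pass: flip a flag at the first '# Worklog' header, then
--     collect non-empty lines (unstripped)."""
--     entries = []
--     in_section = False
--     for line in lines:
--         if not in_section:
--             if line.strip() == "# Worklog":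
--                 in_section = True
--             continue
--         if line.strip():
--             entries.append(line)
--     return entries
-- ===== Notes on version B (the rewrite author's own statement) =====
-- stated objective: simpler
-- what changed: Replaced the find-index helper plus slice-and-filter second pass with one fused loop over all lines maintaining an in_section flag; the helper and the slice disappear.
import Mathlib
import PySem

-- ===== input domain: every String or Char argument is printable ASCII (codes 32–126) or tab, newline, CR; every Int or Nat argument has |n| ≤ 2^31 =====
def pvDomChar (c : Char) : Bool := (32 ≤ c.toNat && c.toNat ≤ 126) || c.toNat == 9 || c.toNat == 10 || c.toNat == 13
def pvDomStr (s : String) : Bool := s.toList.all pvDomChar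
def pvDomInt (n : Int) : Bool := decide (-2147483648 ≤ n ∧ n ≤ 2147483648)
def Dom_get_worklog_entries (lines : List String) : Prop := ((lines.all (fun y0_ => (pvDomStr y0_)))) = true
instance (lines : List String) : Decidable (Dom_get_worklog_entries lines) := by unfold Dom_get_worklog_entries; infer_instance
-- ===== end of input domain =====

-- B fuses A's find-header pass and collect pass into one loop with an in_section flag (objective: simpler).

-- ===== PORT A =====
-- helper of find_worklog_section: the 'for idx, line in enumerate(lines)' loop with early return
def findWLgo : List (Int × String) → Int
  | [] => -1
  | (i, l) :: rest => if PySem.Str.strip l = "# Worklog" then i else findWLgo rest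

def find_worklog_section (lines : List String) : Int :=
  findWLgo (PySem.List.enumerate lines 0)

def get_worklog_entries (lines : List String) : List String :=
  let worklog_idx := find_worklog_section lines
  if worklog_idx = -1 then []
  else
    (PySem.List.slice lines (some (worklog_idx + 1)) none).foldl
      (fun entries line => if PySem.Str.strip line = "" then entries else entries ++ [line]) []

-- ===== PORT B =====
def get_worklog_entries_alt (lines : List String) : List String :=
  (lines.foldl
    (fun (st : Bool × List String) line =>
      if st.1 = false then
        (if PySem.Str.strip line = "# Worklog" then (true, st.2) else st)
      else
        (if PySem.Str.strip line = "" then st else (true, st.2 ++ [line])))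
    (false, [])).2

-- ===== PRECONDITION & SPEC =====
def Spec_get_worklog_entries (lines : List String) (out : List String) : Prop := out = get_worklog_entries_alt lines
instance (lines : List String) (out : List String) : Decidable (Spec_get_worklog_entries lines out) := by unfold Spec_get_worklog_entries; infer_instance

-- ===== CLAIM (what is proved, stated in full; the proofs are below) =====
def Claim_equal_get_worklog_entries : Prop := ∀ (lines : List String), Dom_get_worklog_entries lines → Spec_get_worklog_entries lines (get_worklog_entries lines)

-- ===== LEMMAS AND PROOFS =====

-- once the flag is true, B's fold is A's collect loop
theorem fold_true_eq_collect (xs : List String) (acc : List String) :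
    (xs.foldl
      (fun (st : Bool × List String) line =>
        if st.1 = false then
          (if PySem.Str.strip line = "# Worklog" then (true, st.2) else st)
        else
          (if PySem.Str.strip line = "" then st else (true, st.2 ++ [line])))
      (true, acc)).2
    = xs.foldl (fun entries line => if PySem.Str.strip line = "" then entries else entries ++ [line]) acc := by
  induction xs generalizing acc with
  | nil => rfl
  | cons l ls ih =>
    simp only [List.foldl]
    by_cases h : PySem.Str.strip l = ""
    · simp [h, ih]
    · simp [h, ih]

-- findWLgo on an enumerate never drops below its start offset (or is -1)
theorem findWLgo_lb (ls : List String) (s : Int) :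
    findWLgo (PySem.List.enumerate ls s) = -1 ∨ s ≤ findWLgo (PySem.List.enumerate ls s) := by
  induction ls generalizing s with
  | nil => left; rfl
  | cons l ls ih =>
    rw [PySem.List.enumerate_cons]
    simp only [findWLgo]
    by_cases h : PySem.Str.strip l = "# Worklog"
    · right; simp [h]
    · simp only [h, if_false]
      rcases ih (s + 1) with h1 | h1
      · left; exact h1
      · right; omega

-- shifting the enumerate start by one shifts a found index by one (for nonnegative starts)
theorem findWLgo_shift (ls : List String) (s : Int) (hs : 0 ≤ s) :
    findWLgo (PySem.List.enumerate ls (s + 1))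
      = if findWLgo (PySem.List.enumerate ls s) = -1 then -1
        else findWLgo (PySem.List.enumerate ls s) + 1 := by
  induction ls generalizing s with
  | nil => norm_num [PySem.List.enumerate_nil, findWLgo]
  | cons l ls ih =>
    rw [PySem.List.enumerate_cons, PySem.List.enumerate_cons]
    simp only [findWLgo]
    by_cases h : PySem.Str.strip l = "# Worklog"
    · have hne : ¬ (s = -1) := by omega
      simp [h, hne]
    · simp only [h, if_false]
      exact ih (s + 1) (by omega)

-- A drops a non-header first line
theorem A_cons_nomatch (l : String) (ls : List String)
    (h : ¬ PySem.Str.strip l = "# Worklog") :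
    get_worklog_entries (l :: ls) = get_worklog_entries ls := by
  simp only [get_worklog_entries, find_worklog_section]
  rw [PySem.List.enumerate_cons]
  simp only [findWLgo, h, if_false]
  rw [findWLgo_shift ls 0 (le_refl 0)]
  set j := findWLgo (PySem.List.enumerate ls 0) with hj
  by_cases h1 : j = -1
  · simp [h1]
  · have hlb : (0:Int) ≤ j := by
      rcases findWLgo_lb ls 0 with h2 | h2
      · exact absurd h2 h1
      · exact h2
    have hne : ¬ (j + 1 = -1) := by omega
    simp only [h1, hne, if_false]
    have e1 : PySem.List.slice (l :: ls) (some (j + 1 + 1)) none = List.drop ((j+1+1).toNat) (l :: ls) :=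
      PySem.List.slice_from _ (by omega)
    have e2 : PySem.List.slice ls (some (j + 1)) none = List.drop ((j+1).toNat) ls :=
      PySem.List.slice_from _ (by omega)
    rw [e1, e2]
    have e3 : (j+1+1).toNat = (j+1).toNat + 1 := by omega
    rw [e3, List.drop_succ_cons]

-- main equivalence
theorem main_eq (lines : List String) :
    get_worklog_entries lines = get_worklog_entries_alt lines := by
  induction lines with
  | nil => rfl
  | cons l ls ih =>
    by_cases h : PySem.Str.strip l = "# Worklog"
    · -- A: header found at index 0, collect the tail; B: flag flips, collect the tail
      have hA : get_worklog_entries (l :: ls)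
          = ls.foldl (fun entries line => if PySem.Str.strip line = "" then entries else entries ++ [line]) [] := by
        simp only [get_worklog_entries, find_worklog_section]
        rw [PySem.List.enumerate_cons]
        simp only [findWLgo, h, if_true]
        norm_num
        rw [show PySem.List.slice (l :: ls) (some 1) none = ls from by
          simpa using PySem.List.slice_from_one (l :: ls)]
      have hB : get_worklog_entries_alt (l :: ls)
          = ls.foldl (fun entries line => if PySem.Str.strip line = "" then entries else entries ++ [line]) [] := by
        simp only [get_worklog_entries_alt, List.foldl_cons]
        norm_num [h]
        exact fold_true_eq_collect ls []
      rw [hA, hB]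
    · rw [A_cons_nomatch l ls h, ih]
      simp only [get_worklog_entries_alt, List.foldl_cons]
      norm_num [h]

-- ===== VERDICT (by name: the statement is the Claim_ definition above) =====
theorem get_worklog_entries_spec : Claim_equal_get_worklog_entries := by
  intro lines _
  exact main_eq lines
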